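-- pv_equiv track=rewrite | github.com/DaqianLiao/LogAnalyseSystem | publicfunction/PublicJudgeFunction.py | time_limit_function
-- ===== SOURCE A (Python) =====
-- def time_limit_function(time_gap_sequence, time_limit):
--    bool_value = True
--    index = 0
--    while index < len(time_gap_sequence) and bool_value:
--        if 0 < time_gap_sequence[index] and time_gap_sequence[index] < time_limit:  #limit 单位为毫秒
--            index = index + 1
--            continue
--        else:
--            bool_value = False
--    return bool_value
-- ===== SOURCE B (Python) =====
-- def time_limit_function(time_gap_sequence, time_limit):
--     if not time_gap_sequence:
--         return True
--     return min(time_gap_sequence) > 0 and max(time_gap_sequence) < time_limit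
-- ===== Notes on version B (the rewrite author's own statement) =====
-- stated objective: simpler
-- what changed: Replaced the index-driven short-circuit while loop with an aggregate-then-compare form: min(seq) > 0 and max(seq) < limit (True on empty).
import Mathlib
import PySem

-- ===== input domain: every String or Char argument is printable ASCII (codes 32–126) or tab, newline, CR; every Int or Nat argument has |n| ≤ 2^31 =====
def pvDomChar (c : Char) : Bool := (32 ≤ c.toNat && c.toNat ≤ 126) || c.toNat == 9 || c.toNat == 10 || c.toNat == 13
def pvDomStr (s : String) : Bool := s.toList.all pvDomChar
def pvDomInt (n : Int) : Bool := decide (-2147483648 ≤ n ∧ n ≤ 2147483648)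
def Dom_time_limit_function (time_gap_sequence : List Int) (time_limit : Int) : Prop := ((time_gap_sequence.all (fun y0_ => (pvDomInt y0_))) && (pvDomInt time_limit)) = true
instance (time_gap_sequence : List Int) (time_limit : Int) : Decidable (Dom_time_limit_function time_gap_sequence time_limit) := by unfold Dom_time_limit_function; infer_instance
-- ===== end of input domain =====

-- B replaces A's element-by-element short-circuit scan with min/max aggregation and two boundary comparisons (objective: simpler).

-- ===== PORT A =====
-- the while loop over index, as structural recursion over the remaining list
def tlfLoop (time_limit : Int) : List Int → Bool
  | [] => true
  | x :: xs => if 0 < x ∧ x < time_limit then tlfLoop time_limit xs else false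

def time_limit_function (time_gap_sequence : List Int) (time_limit : Int) : Bool :=
  tlfLoop time_limit time_gap_sequence

-- ===== PORT B =====
def time_limit_function_alt (time_gap_sequence : List Int) (time_limit : Int) : Bool :=
  match PySem.List.min? time_gap_sequence (fun x => x), PySem.List.max? time_gap_sequence (fun x => x) with
  | some mn, some mx => decide (0 < mn) && decide (mx < time_limit)
  | _, _ => true

-- ===== PRECONDITION & SPEC =====
def Spec_time_limit_function (time_gap_sequence : List Int) (time_limit : Int) (out : Bool) : Prop := out = time_limit_function_alt time_gap_sequence time_limit
instance (time_gap_sequence : List Int) (time_limit : Int) (out : Bool) : Decidable (Spec_time_limit_function time_gap_sequence time_limit out) := by unfold Spec_time_limit_function; infer_instance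

-- ===== CLAIM (what is proved, stated in full; the proofs are below) =====
def Claim_equal_time_limit_function : Prop := ∀ (time_gap_sequence : List Int) (time_limit : Int), Dom_time_limit_function time_gap_sequence time_limit → Spec_time_limit_function time_gap_sequence time_limit (time_limit_function time_gap_sequence time_limit)

-- ===== LEMMAS AND PROOFS =====
theorem tlfLoop_eq_decide (l : Int) (s : List Int) :
    tlfLoop l s = decide (∀ y ∈ s, 0 < y ∧ y < l) := by
  induction s with
  | nil => simp [tlfLoop]
  | cons x xs ih => by_cases h : 0 < x ∧ x < l <;> simp [tlfLoop, h, ih]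

theorem foldl_min_pos (t : List Int) (x : Int) :
    0 < t.foldl min x ↔ 0 < x ∧ ∀ y ∈ t, 0 < y := by
  induction t generalizing x with
  | nil => simp
  | cons a t ih =>
    simp only [List.foldl_cons, ih, lt_min_iff, List.mem_cons]
    constructor
    · rintro ⟨⟨hx, ha⟩, h⟩
      exact ⟨hx, fun y hy => hy.elim (fun e => e ▸ ha) (h y)⟩
    · rintro ⟨hx, h⟩
      exact ⟨⟨hx, h a (Or.inl rfl)⟩, fun y hy => h y (Or.inr hy)⟩

theorem foldl_max_lt (l : Int) (t : List Int) (x : Int) :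
    t.foldl max x < l ↔ x < l ∧ ∀ y ∈ t, y < l := by
  induction t generalizing x with
  | nil => simp
  | cons a t ih =>
    simp only [List.foldl_cons, ih, max_lt_iff, List.mem_cons]
    constructor
    · rintro ⟨⟨hx, ha⟩, h⟩
      exact ⟨hx, fun y hy => hy.elim (fun e => e ▸ ha) (h y)⟩
    · rintro ⟨hx, h⟩
      exact ⟨⟨hx, h a (Or.inl rfl)⟩, fun y hy => h y (Or.inr hy)⟩

theorem alt_eq_decide (s : List Int) (l : Int) :
    time_limit_function_alt s l = decide (∀ y ∈ s, 0 < y ∧ y < l) := by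
  cases s with
  | nil => simp [time_limit_function_alt, PySem.List.min?, PySem.List.max?]
  | cons x t =>
    simp only [time_limit_function_alt, PySem.List.min?_id_cons, PySem.List.max?_id_cons]
    rw [show (decide (0 < t.foldl min x) && decide (t.foldl max x < l))
          = decide (0 < t.foldl min x ∧ t.foldl max x < l) by simp]
    congr 1
    rw [eq_iff_iff, foldl_min_pos, foldl_max_lt]
    constructor
    · rintro ⟨⟨hx, hmn⟩, hxl, hmx⟩
      intro y hy
      rcases List.mem_cons.mp hy with e | hm
      · exact ⟨e ▸ hx, e ▸ hxl⟩
      · exact ⟨hmn y hm, hmx y hm⟩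
    · intro h
      refine ⟨⟨(h x (List.mem_cons_self)).1, fun y hy => (h y (List.mem_cons_of_mem _ hy)).1⟩,
        (h x (List.mem_cons_self)).2, fun y hy => (h y (List.mem_cons_of_mem _ hy)).2⟩

-- ===== VERDICT (by name: the statement is the Claim_ definition above) =====
theorem time_limit_function_spec : Claim_equal_time_limit_function := by
  intro s l _
  unfold Spec_time_limit_function time_limit_function
  rw [tlfLoop_eq_decide, alt_eq_decide]
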